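-- pv_equiv track=rewrite | github.com/Niranjan11111/Accenture-Coding-Solutions | Accenture Prep/prajith/halloween candies.py | halloween
-- ===== SOURCE A (Python) =====
-- def halloween(n, a, i):
--     y=[]
--     for x in a:
--         if x <=i:
--             y.append(x)
--
--     if len(y) == 0:
--         return n
--
--     y.sort()
--     d = n - len(y)
--     index = 0
--     while index < len(y):
--         m = y[index]
--         if m == 0:
--             break
--         d += 1
--         index += 1
--
--     return d
-- ===== SOURCE B (Python) =====
-- def halloween(n, a, i):
--     le = neg = 0
--     has_zero = False
--     for x in a:
--         if x <= i:
--             le += 1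
--         if x < 0:
--             neg += 1
--         if x == 0:
--             has_zero = True
--     if le and has_zero and i >= 0:
--         return n - le + neg
--     return n
-- ===== Notes on version B (the rewrite author's own statement) =====
-- stated objective: faster
-- what changed: Replaces filter-then-sort-then-scan with a single unsorted pass counting elements <= i, negatives, and whether 0 occurs; the sorted scan's result is the negative count when a 0 is selected, else n.
import Mathlib
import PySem

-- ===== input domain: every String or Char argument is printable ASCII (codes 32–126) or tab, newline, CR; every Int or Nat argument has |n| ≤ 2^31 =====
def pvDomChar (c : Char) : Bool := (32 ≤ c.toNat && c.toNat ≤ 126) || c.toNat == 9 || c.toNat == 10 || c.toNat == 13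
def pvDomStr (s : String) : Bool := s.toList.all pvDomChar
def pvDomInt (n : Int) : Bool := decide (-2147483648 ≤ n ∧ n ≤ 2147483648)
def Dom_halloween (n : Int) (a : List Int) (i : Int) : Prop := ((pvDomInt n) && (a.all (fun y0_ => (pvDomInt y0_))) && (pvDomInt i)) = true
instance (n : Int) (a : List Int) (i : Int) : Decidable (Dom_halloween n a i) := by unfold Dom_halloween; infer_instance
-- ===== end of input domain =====

-- B replaces A's filter + sort + scan-to-first-zero with one unsorted counting pass (no sort needed).

-- ===== PORT A =====
-- 'for x in a: if x <= i: y.append(x)'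
def halloweenFilter (a : List Int) (i : Int) : List Int :=
  a.foldl (fun y x => if x ≤ i then y ++ [x] else y) []

-- 'index = 0; while index < len(y): m = y[index]; if m == 0: break; d += 1; index += 1'
def halloweenWalk (ys : List Int) (d : Int) : Int :=
  match ys with
  | [] => d
  | m :: rest => if m = 0 then d else halloweenWalk rest (d + 1)

def halloween (n : Int) (a : List Int) (i : Int) : Int :=
  let y := halloweenFilter a i
  if y.length = 0 then n
  else
    let ys := PySem.List.sorted y (fun x => x) false
    halloweenWalk ys (n - y.length)

-- ===== PORT B =====
def halloween_alt (n : Int) (a : List Int) (i : Int) : Int :=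
  let s := a.foldl
    (fun (acc : Int × Int × Bool) x =>
      (acc.1 + (if x ≤ i then 1 else 0),
       acc.2.1 + (if x < 0 then 1 else 0),
       acc.2.2 || decide (x = 0)))
    (0, 0, false)
  if s.1 ≠ 0 ∧ s.2.2 = true ∧ 0 ≤ i then n - s.1 + s.2.1 else n

-- ===== PRECONDITION & SPEC =====
def Spec_halloween (n : Int) (a : List Int) (i : Int) (out : Int) : Prop := out = halloween_alt n a i
instance (n : Int) (a : List Int) (i : Int) (out : Int) : Decidable (Spec_halloween n a i out) := by unfold Spec_halloween; infer_instance

-- ===== CLAIM (what is proved, stated in full; the proofs are below) =====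
def Claim_equal_halloween : Prop := ∀ (n : Int) (a : List Int) (i : Int), Dom_halloween n a i → Spec_halloween n a i (halloween n a i)

-- ===== LEMMAS AND PROOFS =====

theorem halloweenFilter_eq (a : List Int) (i : Int) :
    halloweenFilter a i = a.filter (fun x => x ≤ i) := by
  simpa using PySem.List.foldl_append_ite_eq_filter (fun x : Int => x ≤ i) a []

-- A's while loop on a (≤)-sorted list: adds the count of negatives if a 0 occurs, else the length.
theorem halloweenWalk_sorted (ys : List Int) (hs : ys.Pairwise (· ≤ ·)) (d : Int) :
    halloweenWalk ys d =
      d + (if (0 : Int) ∈ ys then (ys.countP (fun x => x < 0) : Int) else (ys.length : Int)) := by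
  induction ys generalizing d with
  | nil => simp [halloweenWalk]
  | cons m rest ih =>
    rcases List.pairwise_cons.mp hs with ⟨hm, hrest⟩
    by_cases hz : m = 0
    · subst hz
      have hnone : rest.countP (fun x : Int => x < 0) = 0 := by
        rw [List.countP_eq_zero]
        intro x hx
        simpa using not_lt.mpr (hm x hx)
      simp [halloweenWalk, hnone]
    · by_cases hneg : m < 0
      · have : halloweenWalk (m :: rest) d = halloweenWalk rest (d + 1) := by
          simp [halloweenWalk, hz]
        rw [this, ih hrest]
        have hmem : ((0 : Int) ∈ m :: rest) ↔ ((0 : Int) ∈ rest) := by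
          simp [hz, eq_comm]
        by_cases h0 : (0 : Int) ∈ rest
        · simp [hmem, h0, hneg]
          ring
        · simp [hmem, h0]
          ring
      · -- m > 0: everything in rest is ≥ m > 0, so no zero and no break: full length
        have hpos : 0 < m := lt_of_le_of_ne (not_lt.mp hneg) (Ne.symm hz)
        have hno0 : (0 : Int) ∉ m :: rest := by
          intro h
          rcases List.mem_cons.mp h with h | h
          · exact hz h.symm
          · exact absurd (hm 0 h) (not_le.mpr hpos)
        have : halloweenWalk (m :: rest) d = halloweenWalk rest (d + 1) := by
          simp [halloweenWalk, hz]
        rw [this, ih hrest]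
        have hno0r : (0 : Int) ∉ rest := fun h => hno0 (List.mem_cons_of_mem _ h)
        simp [hno0, hno0r]
        ring

-- B's fold computes the three counters in closed form.
theorem halloween_fold_eq (a : List Int) (i : Int) :
    a.foldl
      (fun (acc : Int × Int × Bool) x =>
        (acc.1 + (if x ≤ i then 1 else 0),
         acc.2.1 + (if x < 0 then 1 else 0),
         acc.2.2 || decide (x = 0)))
      (0, 0, false)
    = ((a.countP (fun x => x ≤ i) : Int), (a.countP (fun x => x < 0) : Int),
        decide ((0 : Int) ∈ a)) := by
  have key : ∀ (l : List Int) (acc : Int × Int × Bool),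
      l.foldl
        (fun (acc : Int × Int × Bool) x =>
          (acc.1 + (if x ≤ i then 1 else 0),
           acc.2.1 + (if x < 0 then 1 else 0),
           acc.2.2 || decide (x = 0)))
        acc
      = (acc.1 + (l.countP (fun x => x ≤ i) : Int),
         acc.2.1 + (l.countP (fun x => x < 0) : Int),
         acc.2.2 || decide ((0 : Int) ∈ l)) := by
    intro l
    induction l with
    | nil => intro acc; simp
    | cons x t ih =>
      intro acc
      simp only [List.foldl_cons, ih, List.countP_cons, List.mem_cons]
      refine Prod.ext ?_ (Prod.ext ?_ ?_)
      · by_cases h : x ≤ i <;> simp [h, add_comm, add_assoc]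
      · by_cases h : x < 0 <;> simp [h, add_comm, add_assoc]
      · by_cases h : x = 0
        · simp [h]
        · have : ¬ ((0 : Int) = x) := fun hh => h hh.symm
          simp [h, this]
  simpa using key a (0, 0, false)

theorem halloween_spec_aux (n : Int) (a : List Int) (i : Int) :
    halloween n a i = halloween_alt n a i := by
  unfold halloween halloween_alt
  rw [halloween_fold_eq]
  simp only []
  set y := halloweenFilter a i with hy
  have hyf : y = a.filter (fun x => x ≤ i) := halloweenFilter_eq a i
  have hcount : (a.countP (fun x => x ≤ i)) = y.length := by
    simp [hyf, List.countP_eq_length_filter]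
  by_cases hlen : y.length = 0
  · -- y empty: both return n
    have hc : (a.countP (fun x => x ≤ i) : Int) = 0 := by rw [hcount]; exact_mod_cast congrArg (Nat.cast (R := Int)) hlen
    simp [hlen, hc]
  · simp only [hlen, if_false]
    set ys := PySem.List.sorted y (fun x => x) false with hys
    have hperm : ys.Perm y := PySem.List.sorted_perm y (fun x => x) false
    have hpair : ys.Pairwise (· ≤ ·) := by
      have := PySem.List.sorted_pairwise (xs := y) (key := fun x : Int => x)
      simpa [hys] using this
    rw [halloweenWalk_sorted ys hpair]
    have hmem : ((0 : Int) ∈ ys) ↔ ((0 : Int) ∈ y) := hperm.mem_iff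
    have hcys : ys.countP (fun x : Int => x < 0) = y.countP (fun x : Int => x < 0) :=
      hperm.countP_eq _
    have hlys : ys.length = y.length := hperm.length_eq
    -- 0 ∈ y ↔ 0 ∈ a ∧ 0 ≤ i
    have h0y : ((0 : Int) ∈ y) ↔ ((0 : Int) ∈ a ∧ 0 ≤ i) := by
      rw [hyf]; simp [List.mem_filter]
    by_cases h0 : (0 : Int) ∈ y
    · -- zero selected: i ≥ 0, so negatives in y = negatives in a
      rcases h0y.mp h0 with ⟨h0a, hi⟩
      have hnegeq : y.countP (fun x : Int => x < 0) = a.countP (fun x : Int => x < 0) := by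
        rw [hyf, List.countP_filter]
        congr 1
        funext x
        by_cases hx : x < 0
        · have : x ≤ i := le_trans (le_of_lt hx) hi
          simp [hx, this]
        · simp [hx]
      have hle0 : (a.countP (fun x => x ≤ i) : Int) ≠ 0 := by
        rw [hcount]
        exact_mod_cast hlen
      simp only [hmem, h0, hcys, hnegeq, hcount, if_true, h0a, hi, decide_eq_true_eq, and_true]
      rw [if_pos (by exact_mod_cast hlen : (y.length : Int) ≠ 0)]
    · -- no zero selected: A walks the whole list, returning n; B's condition fails
      have hB : ¬ ((0 : Int) ∈ a ∧ 0 ≤ i) := fun h => h0 (h0y.mpr h)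
      have hcond : ¬ ((a.countP (fun x => x ≤ i) : Int) ≠ 0 ∧ decide ((0 : Int) ∈ a) = true ∧ 0 ≤ i) := by
        rintro ⟨-, hz, hi⟩
        exact hB ⟨by simpa using hz, hi⟩
      have h0ys : (0 : Int) ∉ ys := fun h => h0 (hmem.mp h)
      rw [if_neg h0ys, if_neg hcond, hlys]
      ring

-- ===== VERDICT (by name: the statement is the Claim_ definition above) =====
theorem halloween_spec : Claim_equal_halloween := by
  intro n a i _
  exact halloween_spec_aux n a i
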